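-- pv_equiv track=rewrite | github.com/WouterArtsRecruitin/recruitin-boolean- | recruitin_boolean/search/boolean_builder.py | _get_nearby_locations
-- ===== SOURCE A (Python) =====
-- from typing import Dict, List, Optional, Tuple
--
-- def _get_nearby_locations(location: str) -> List[str]:
--     """
--     Geeft nabijgelegen locaties voor geografische filtering.
--
--     Args:
--         location: Base location to find nearby locations for
--
--     Returns:
--         List of nearby locations including the base location
--     """
--     # Recruitin-specific region mapping for NL
--     region_mapping = {
--         "GELDERLAND": ["Arnhem", "Nijmegen", "Apeldoorn", "Ede", "Doetinchem"],
--         "OVERIJSSEL": ["Zwolle", "Enschede", "Deventer", "Almelo", "Hengelo"],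
--         "NOORD-BRABANT": ["Eindhoven", "Tilburg", "Breda", "'s-Hertogenbosch", "Helmond"],
--         "LIMBURG": ["Maastricht", "Venlo", "Roermond", "Heerlen", "Sittard"],
--         "UTRECHT": ["Utrecht", "Amersfoort", "Nieuwegein", "Veenendaal", "Zeist"]
--     }
--
--     # Check input validity
--     if location is None or (isinstance(location, float) and str(location) == 'nan'):
--         return []
--
--     location = str(location).strip()
--     if not location:
--         return []
--
--     result = [location]
--     for region, cities in region_mapping.items():
--         if location.upper() in [c.upper() for c in cities]:
--             result.extend(cities)
--             break
--         if location.upper() == region: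
--             result.extend(cities)
--             break
--
--     return list(set(result))
-- ===== SOURCE B (Python) =====
-- # B: one prebuilt inverted index (upper city/region name -> region's city list) replaces the region loop.
-- REGION_MAPPING = {
--     "GELDERLAND": ["Arnhem", "Nijmegen", "Apeldoorn", "Ede", "Doetinchem"],
--     "OVERIJSSEL": ["Zwolle", "Enschede", "Deventer", "Almelo", "Hengelo"],
--     "NOORD-BRABANT": ["Eindhoven", "Tilburg", "Breda", "'s-Hertogenbosch", "Helmond"],
--     "LIMBURG": ["Maastricht", "Venlo", "Roermond", "Heerlen", "Sittard"],
--     "UTRECHT": ["Utrecht", "Amersfoort", "Nieuwegein", "Veenendaal", "Zeist"]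
-- }
--
-- _LOOKUP = {}
-- for _region, _cities in REGION_MAPPING.items():
--     _LOOKUP[_region] = _cities
--     for _c in _cities:
--         _LOOKUP[_c.upper()] = _cities
--
--
-- def _get_nearby_locations(location):
--     if location is None or (isinstance(location, float) and str(location) == 'nan'):
--         return []
--     location = str(location).strip()
--     if not location:
--         return []
--     result = [location]
--     cities = _LOOKUP.get(location.upper())
--     if cities is not None:
--         result.extend(cities)
--     return list(set(result))
-- ===== Notes on version B (the rewrite author's own statement) =====
-- stated objective: idiomatic
-- what changed: Replaces the region-by-region scan (re-uppercasing each city list, with break) by a single lookup in an inverted index built once, mapping each uppercase city/region name to its region's city list.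
import Mathlib
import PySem

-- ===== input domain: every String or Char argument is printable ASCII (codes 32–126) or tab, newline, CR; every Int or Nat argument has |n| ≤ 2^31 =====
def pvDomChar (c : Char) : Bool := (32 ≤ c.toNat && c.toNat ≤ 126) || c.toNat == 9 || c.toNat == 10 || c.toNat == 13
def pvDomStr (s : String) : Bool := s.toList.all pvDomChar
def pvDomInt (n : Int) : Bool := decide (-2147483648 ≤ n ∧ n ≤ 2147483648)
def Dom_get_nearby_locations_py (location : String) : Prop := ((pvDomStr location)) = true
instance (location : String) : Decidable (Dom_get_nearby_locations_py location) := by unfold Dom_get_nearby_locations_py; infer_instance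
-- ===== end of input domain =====

-- B replaces A's region-scan loop by one lookup in a prebuilt inverted index (idiomatic/alternative; same cost on this fixed data).
-- Python's final list(set(result)) has hash order; result equality here is as the outputs are compared: as a set (both ports use PySem.Set.ofList, first-occurrence order).

-- ===== PORT A =====
def regionMappingA : List (String × List String) :=
  [("GELDERLAND", ["Arnhem", "Nijmegen", "Apeldoorn", "Ede", "Doetinchem"]),
   ("OVERIJSSEL", ["Zwolle", "Enschede", "Deventer", "Almelo", "Hengelo"]),
   ("NOORD-BRABANT", ["Eindhoven", "Tilburg", "Breda", "'s-Hertogenbosch", "Helmond"]),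
   ("LIMBURG", ["Maastricht", "Venlo", "Roermond", "Heerlen", "Sittard"]),
   ("UTRECHT", ["Utrecht", "Amersfoort", "Nieuwegein", "Veenendaal", "Zeist"])]

-- the 'for region, cities … break' loop of A, step for step
def nearbyLoopA (location : String) (regions : List (String × List String)) (result : List String) : List String :=
  match regions with
  | [] => result
  | (region, cities) :: rest =>
    if (cities.map PySem.Str.upper).contains (PySem.Str.upper location) then result ++ cities
    else if PySem.Str.upper location = region then result ++ cities
    else nearbyLoopA location rest result

def get_nearby_locations_py (location : String) : List String :=
  -- the 'location is None' / float-nan guards of A cannot fire for a str argument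
  let location := PySem.Str.strip location
  if location = "" then []
  else PySem.Set.ofList (nearbyLoopA location regionMappingA [location])

-- ===== PORT B =====
-- the prebuilt inverted index of Source B: upper city name / region name ↦ the region's city list
def nearbyLookup : PySem.Dict String (List String) :=
  regionMappingA.foldl
    (fun d rc => rc.2.foldl (fun d c => d.insert (PySem.Str.upper c) rc.2) (d.insert rc.1 rc.2)) (PySem.Dict.empty)

def get_nearby_locations_py_alt (location : String) : List String :=
  let location := PySem.Str.strip location
  if location = "" then []
  else
    let result := [location]
    let result := match nearbyLookup.get? (PySem.Str.upper location) with
      | some cities => result ++ cities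
      | none => result
    PySem.Set.ofList result

-- ===== PRECONDITION & SPEC =====
def Spec_get_nearby_locations_py (location : String) (out : List String) : Prop := out = get_nearby_locations_py_alt location
instance (location : String) (out : List String) : Decidable (Spec_get_nearby_locations_py location out) := by unfold Spec_get_nearby_locations_py; infer_instance

-- ===== CLAIM (what is proved, stated in full; the proofs are below) =====
def Claim_equal_get_nearby_locations_py : Prop := ∀ (location : String), Dom_get_nearby_locations_py location → Spec_get_nearby_locations_py location (get_nearby_locations_py location)

-- ===== LEMMAS AND PROOFS =====
-- literal uppercase evaluations of the fixed city names (used by simp in the all-miss branch)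
@[simp] lemma pvUp0 : PySem.Str.upper "Arnhem" = "ARNHEM" := by decide
@[simp] lemma pvUp1 : PySem.Str.upper "Nijmegen" = "NIJMEGEN" := by decide
@[simp] lemma pvUp2 : PySem.Str.upper "Apeldoorn" = "APELDOORN" := by decide
@[simp] lemma pvUp3 : PySem.Str.upper "Ede" = "EDE" := by decide
@[simp] lemma pvUp4 : PySem.Str.upper "Doetinchem" = "DOETINCHEM" := by decide
@[simp] lemma pvUp5 : PySem.Str.upper "Zwolle" = "ZWOLLE" := by decide
@[simp] lemma pvUp6 : PySem.Str.upper "Enschede" = "ENSCHEDE" := by decide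
@[simp] lemma pvUp7 : PySem.Str.upper "Deventer" = "DEVENTER" := by decide
@[simp] lemma pvUp8 : PySem.Str.upper "Almelo" = "ALMELO" := by decide
@[simp] lemma pvUp9 : PySem.Str.upper "Hengelo" = "HENGELO" := by decide
@[simp] lemma pvUp10 : PySem.Str.upper "Eindhoven" = "EINDHOVEN" := by decide
@[simp] lemma pvUp11 : PySem.Str.upper "Tilburg" = "TILBURG" := by decide
@[simp] lemma pvUp12 : PySem.Str.upper "Breda" = "BREDA" := by decide
@[simp] lemma pvUp13 : PySem.Str.upper "'s-Hertogenbosch" = "'S-HERTOGENBOSCH" := by decide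
@[simp] lemma pvUp14 : PySem.Str.upper "Helmond" = "HELMOND" := by decide
@[simp] lemma pvUp15 : PySem.Str.upper "Maastricht" = "MAASTRICHT" := by decide
@[simp] lemma pvUp16 : PySem.Str.upper "Venlo" = "VENLO" := by decide
@[simp] lemma pvUp17 : PySem.Str.upper "Roermond" = "ROERMOND" := by decide
@[simp] lemma pvUp18 : PySem.Str.upper "Heerlen" = "HEERLEN" := by decide
@[simp] lemma pvUp19 : PySem.Str.upper "Sittard" = "SITTARD" := by decide
@[simp] lemma pvUp20 : PySem.Str.upper "Utrecht" = "UTRECHT" := by decide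
@[simp] lemma pvUp21 : PySem.Str.upper "Amersfoort" = "AMERSFOORT" := by decide
@[simp] lemma pvUp22 : PySem.Str.upper "Nieuwegein" = "NIEUWEGEIN" := by decide
@[simp] lemma pvUp23 : PySem.Str.upper "Veenendaal" = "VEENENDAAL" := by decide
@[simp] lemma pvUp24 : PySem.Str.upper "Zeist" = "ZEIST" := by decide

set_option maxHeartbeats 1000000 in
lemma nearbyLookup_items :
    nearbyLookup.items =
  [("GELDERLAND", ["Arnhem", "Nijmegen", "Apeldoorn", "Ede", "Doetinchem"]),
   ("ARNHEM", ["Arnhem", "Nijmegen", "Apeldoorn", "Ede", "Doetinchem"]),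
   ("NIJMEGEN", ["Arnhem", "Nijmegen", "Apeldoorn", "Ede", "Doetinchem"]),
   ("APELDOORN", ["Arnhem", "Nijmegen", "Apeldoorn", "Ede", "Doetinchem"]),
   ("EDE", ["Arnhem", "Nijmegen", "Apeldoorn", "Ede", "Doetinchem"]),
   ("DOETINCHEM", ["Arnhem", "Nijmegen", "Apeldoorn", "Ede", "Doetinchem"]),
   ("OVERIJSSEL", ["Zwolle", "Enschede", "Deventer", "Almelo", "Hengelo"]),
   ("ZWOLLE", ["Zwolle", "Enschede", "Deventer", "Almelo", "Hengelo"]),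
   ("ENSCHEDE", ["Zwolle", "Enschede", "Deventer", "Almelo", "Hengelo"]),
   ("DEVENTER", ["Zwolle", "Enschede", "Deventer", "Almelo", "Hengelo"]),
   ("ALMELO", ["Zwolle", "Enschede", "Deventer", "Almelo", "Hengelo"]),
   ("HENGELO", ["Zwolle", "Enschede", "Deventer", "Almelo", "Hengelo"]),
   ("NOORD-BRABANT", ["Eindhoven", "Tilburg", "Breda", "'s-Hertogenbosch", "Helmond"]),
   ("EINDHOVEN", ["Eindhoven", "Tilburg", "Breda", "'s-Hertogenbosch", "Helmond"]),
   ("TILBURG", ["Eindhoven", "Tilburg", "Breda", "'s-Hertogenbosch", "Helmond"]),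
   ("BREDA", ["Eindhoven", "Tilburg", "Breda", "'s-Hertogenbosch", "Helmond"]),
   ("'S-HERTOGENBOSCH", ["Eindhoven", "Tilburg", "Breda", "'s-Hertogenbosch", "Helmond"]),
   ("HELMOND", ["Eindhoven", "Tilburg", "Breda", "'s-Hertogenbosch", "Helmond"]),
   ("LIMBURG", ["Maastricht", "Venlo", "Roermond", "Heerlen", "Sittard"]),
   ("MAASTRICHT", ["Maastricht", "Venlo", "Roermond", "Heerlen", "Sittard"]),
   ("VENLO", ["Maastricht", "Venlo", "Roermond", "Heerlen", "Sittard"]),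
   ("ROERMOND", ["Maastricht", "Venlo", "Roermond", "Heerlen", "Sittard"]),
   ("HEERLEN", ["Maastricht", "Venlo", "Roermond", "Heerlen", "Sittard"]),
   ("SITTARD", ["Maastricht", "Venlo", "Roermond", "Heerlen", "Sittard"]),
   ("UTRECHT", ["Utrecht", "Amersfoort", "Nieuwegein", "Veenendaal", "Zeist"]),
   ("AMERSFOORT", ["Utrecht", "Amersfoort", "Nieuwegein", "Veenendaal", "Zeist"]),
   ("NIEUWEGEIN", ["Utrecht", "Amersfoort", "Nieuwegein", "Veenendaal", "Zeist"]),
   ("VEENENDAAL", ["Utrecht", "Amersfoort", "Nieuwegein", "Veenendaal", "Zeist"]),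
   ("ZEIST", ["Utrecht", "Amersfoort", "Nieuwegein", "Veenendaal", "Zeist"])] := by decide

lemma nearby_core (loc : String) :
    nearbyLoopA loc regionMappingA [loc] =
      (match nearbyLookup.get? (PySem.Str.upper loc) with
        | some cities => [loc] ++ cities
        | none => [loc]) := by
  by_cases h0 : PySem.Str.upper loc = "GELDERLAND"
  · simp [nearbyLoopA, regionMappingA, PySem.Dict.get?, nearbyLookup_items, h0]
  by_cases h1 : PySem.Str.upper loc = "ARNHEM"
  · simp [nearbyLoopA, regionMappingA, PySem.Dict.get?, nearbyLookup_items, h1]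
  by_cases h2 : PySem.Str.upper loc = "NIJMEGEN"
  · simp [nearbyLoopA, regionMappingA, PySem.Dict.get?, nearbyLookup_items, h2]
  by_cases h3 : PySem.Str.upper loc = "APELDOORN"
  · simp [nearbyLoopA, regionMappingA, PySem.Dict.get?, nearbyLookup_items, h3]
  by_cases h4 : PySem.Str.upper loc = "EDE"
  · simp [nearbyLoopA, regionMappingA, PySem.Dict.get?, nearbyLookup_items, h4]
  by_cases h5 : PySem.Str.upper loc = "DOETINCHEM"
  · simp [nearbyLoopA, regionMappingA, PySem.Dict.get?, nearbyLookup_items, h5]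
  by_cases h6 : PySem.Str.upper loc = "OVERIJSSEL"
  · simp [nearbyLoopA, regionMappingA, PySem.Dict.get?, nearbyLookup_items, h6]
  by_cases h7 : PySem.Str.upper loc = "ZWOLLE"
  · simp [nearbyLoopA, regionMappingA, PySem.Dict.get?, nearbyLookup_items, h7]
  by_cases h8 : PySem.Str.upper loc = "ENSCHEDE"
  · simp [nearbyLoopA, regionMappingA, PySem.Dict.get?, nearbyLookup_items, h8]
  by_cases h9 : PySem.Str.upper loc = "DEVENTER"
  · simp [nearbyLoopA, regionMappingA, PySem.Dict.get?, nearbyLookup_items, h9]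
  by_cases h10 : PySem.Str.upper loc = "ALMELO"
  · simp [nearbyLoopA, regionMappingA, PySem.Dict.get?, nearbyLookup_items, h10]
  by_cases h11 : PySem.Str.upper loc = "HENGELO"
  · simp [nearbyLoopA, regionMappingA, PySem.Dict.get?, nearbyLookup_items, h11]
  by_cases h12 : PySem.Str.upper loc = "NOORD-BRABANT"
  · simp [nearbyLoopA, regionMappingA, PySem.Dict.get?, nearbyLookup_items, h12]
  by_cases h13 : PySem.Str.upper loc = "EINDHOVEN"
  · simp [nearbyLoopA, regionMappingA, PySem.Dict.get?, nearbyLookup_items, h13]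
  by_cases h14 : PySem.Str.upper loc = "TILBURG"
  · simp [nearbyLoopA, regionMappingA, PySem.Dict.get?, nearbyLookup_items, h14]
  by_cases h15 : PySem.Str.upper loc = "BREDA"
  · simp [nearbyLoopA, regionMappingA, PySem.Dict.get?, nearbyLookup_items, h15]
  by_cases h16 : PySem.Str.upper loc = "'S-HERTOGENBOSCH"
  · simp [nearbyLoopA, regionMappingA, PySem.Dict.get?, nearbyLookup_items, h16]
  by_cases h17 : PySem.Str.upper loc = "HELMOND"
  · simp [nearbyLoopA, regionMappingA, PySem.Dict.get?, nearbyLookup_items, h17]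
  by_cases h18 : PySem.Str.upper loc = "LIMBURG"
  · simp [nearbyLoopA, regionMappingA, PySem.Dict.get?, nearbyLookup_items, h18]
  by_cases h19 : PySem.Str.upper loc = "MAASTRICHT"
  · simp [nearbyLoopA, regionMappingA, PySem.Dict.get?, nearbyLookup_items, h19]
  by_cases h20 : PySem.Str.upper loc = "VENLO"
  · simp [nearbyLoopA, regionMappingA, PySem.Dict.get?, nearbyLookup_items, h20]
  by_cases h21 : PySem.Str.upper loc = "ROERMOND"
  · simp [nearbyLoopA, regionMappingA, PySem.Dict.get?, nearbyLookup_items, h21]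
  by_cases h22 : PySem.Str.upper loc = "HEERLEN"
  · simp [nearbyLoopA, regionMappingA, PySem.Dict.get?, nearbyLookup_items, h22]
  by_cases h23 : PySem.Str.upper loc = "SITTARD"
  · simp [nearbyLoopA, regionMappingA, PySem.Dict.get?, nearbyLookup_items, h23]
  by_cases h24 : PySem.Str.upper loc = "UTRECHT"
  · simp [nearbyLoopA, regionMappingA, PySem.Dict.get?, nearbyLookup_items, h24]
  by_cases h25 : PySem.Str.upper loc = "AMERSFOORT"
  · simp [nearbyLoopA, regionMappingA, PySem.Dict.get?, nearbyLookup_items, h25]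
  by_cases h26 : PySem.Str.upper loc = "NIEUWEGEIN"
  · simp [nearbyLoopA, regionMappingA, PySem.Dict.get?, nearbyLookup_items, h26]
  by_cases h27 : PySem.Str.upper loc = "VEENENDAAL"
  · simp [nearbyLoopA, regionMappingA, PySem.Dict.get?, nearbyLookup_items, h27]
  by_cases h28 : PySem.Str.upper loc = "ZEIST"
  · simp [nearbyLoopA, regionMappingA, PySem.Dict.get?, nearbyLookup_items, h28]
  simp [nearbyLoopA, regionMappingA, PySem.Dict.get?, nearbyLookup_items, pvUp0, pvUp1, pvUp2, pvUp3, pvUp4, pvUp5, pvUp6, pvUp7, pvUp8, pvUp9, pvUp10, pvUp11, pvUp12, pvUp13, pvUp14, pvUp15, pvUp16, pvUp17, pvUp18, pvUp19, pvUp20, pvUp21, pvUp22, pvUp23, pvUp24, h0, h1, h2, h3, h4, h5, h6, h7, h8, h9, h10, h11, h12, h13, h14, h15, h16, h17, h18, h19, h20, h21, h22, h23, h24, h25, h26, h27, h28, (Ne.symm h0), (Ne.symm h1), (Ne.symm h2), (Ne.symm h3), (Ne.symm h4), (Ne.symm h5), (Ne.symm h6), (Ne.symm h7), (Ne.symm h8),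 (Ne.symm h9), (Ne.symm h10), (Ne.symm h11), (Ne.symm h12), (Ne.symm h13), (Ne.symm h14), (Ne.symm h15), (Ne.symm h16), (Ne.symm h17), (Ne.symm h18), (Ne.symm h19), (Ne.symm h20), (Ne.symm h21), (Ne.symm h22), (Ne.symm h23), (Ne.symm h24), (Ne.symm h25), (Ne.symm h26), (Ne.symm h27), (Ne.symm h28)]

-- ===== VERDICT (by name: the statement is the Claim_ definition above) =====
theorem get_nearby_locations_py_spec : Claim_equal_get_nearby_locations_py := by
  intro location _
  unfold Spec_get_nearby_locations_py get_nearby_locations_py get_nearby_locations_py_alt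
  simp only []
  split_ifs with h
  · rfl
  · rw [nearby_core]
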